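-- pv_equiv track=rewrite | github.com/jwforres/rfe-creator | scripts/dedup_search.py | _search_cache
-- ===== SOURCE A (Python) =====
-- def _search_cache(cache, keywords, max_results):
--     """Search local cache by keyword substring matching. Returns matches."""
--     if not cache or not cache.get("issues"):
--         return []
--
--     keywords_lower = [kw.lower() for kw in keywords]
--     scored = []
--     for key, summary in cache["issues"].items():
--         summary_lower = summary.lower()
--         hits = sum(1 for kw in keywords_lower if kw in summary_lower)
--         if hits > 0:
--             scored.append((hits, key, summary))
--
--     scored.sort(key=lambda x: (-x[0], x[1]))
--     return scored[:max_results]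
-- ===== SOURCE B (Python) =====
-- def _search_cache(cache, keywords, max_results):
--     """Search local cache by keyword substring matching. Returns matches."""
--     if not cache or not cache.get("issues"):
--         return []
--
--     kws = [kw.lower() for kw in keywords]
--
--     def hits(summary):
--         summary_lower = summary.lower()
--         return sum(1 for kw in kws if kw in summary_lower)
--
--     scored = [(hits(s), k, s) for k, s in cache["issues"].items()]
--     scored = [t for t in scored if t[0] > 0]
--     best = max((t[0] for t in scored), default=0)
--
--     out = []
--     for h in reversed(range(1, best + 1)):
--         out.extend(sorted((t for t in scored if t[0] == h), key=lambda t: t[1]))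
--     return out[:max_results]
-- ===== Notes on version B (the rewrite author's own statement) =====
-- stated objective: alternative
-- what changed: Replaces the global comparison sort on the tuple key (-hits, key) by a counting-bucket selection: summaries are scored by comprehension, the maximum hit count is taken, and the output is assembled by walking hit counts from that maximum down to 1, sorting each bucket by issue key and concatenating, then truncating to max_results.
import Mathlib
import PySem

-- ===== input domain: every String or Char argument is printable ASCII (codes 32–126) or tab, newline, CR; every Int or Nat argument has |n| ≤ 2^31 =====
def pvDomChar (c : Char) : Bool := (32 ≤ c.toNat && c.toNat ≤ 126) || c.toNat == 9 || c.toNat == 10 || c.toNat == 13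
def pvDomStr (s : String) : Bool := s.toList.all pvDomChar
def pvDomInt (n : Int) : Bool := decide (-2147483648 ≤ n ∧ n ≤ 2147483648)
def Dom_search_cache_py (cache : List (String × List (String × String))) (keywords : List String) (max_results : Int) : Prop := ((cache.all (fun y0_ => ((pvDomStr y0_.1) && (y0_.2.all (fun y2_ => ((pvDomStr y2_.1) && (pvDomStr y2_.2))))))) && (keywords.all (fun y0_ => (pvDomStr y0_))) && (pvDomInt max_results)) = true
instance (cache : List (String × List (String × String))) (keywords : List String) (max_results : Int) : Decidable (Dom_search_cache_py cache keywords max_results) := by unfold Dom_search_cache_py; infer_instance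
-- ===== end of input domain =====

-- B replaces A's global sort on the key (-hits, key) by a counting-bucket selection (buckets walked
-- from the maximum hit count down to 1, each sorted by issue key); objective: alternative
-- (same cost class, different selection algorithm).

-- ===== PORT A =====
-- shared helper: the hit count of one summary against the lowered keywords
-- (the scoring line 'hits = sum(1 for kw in keywords_lower if kw in summary_lower)', identical in A and B)
def pvHits (kws : List String) (summary : String) : Int :=
  let summary_lower := PySem.Str.lower summary
  (kws.map (fun kw => if PySem.Str.isIn kw summary_lower then (1 : Int) else 0)).sum

def search_cache_py (cache : List (String × List (String × String))) (keywords : List String) (max_results : Int) : List (Int × String × String) :=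
  let d := PySem.Dict.ofList cache
  if d.items.isEmpty || ((d.get? "issues").getD []).isEmpty then []
  else
    let issues := PySem.Dict.ofList ((d.get? "issues").getD [])
    let keywords_lower := keywords.map PySem.Str.lower
    let scored := issues.items.foldl (fun acc p =>
      let hits := pvHits keywords_lower p.2
      if hits > 0 then acc ++ [(hits, p.1, p.2)] else acc) []
    -- scored.sort(key=lambda x: (-x[0], x[1])); return scored[:max_results]
    PySem.List.slice (PySem.List.sorted2 scored (fun t => -t.1) (fun t => t.2.1)) none (some max_results)

-- ===== PORT B =====
def search_cache_py_alt (cache : List (String × List (String × String))) (keywords : List String) (max_results : Int) : List (Int × String × String) :=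
  let d := PySem.Dict.ofList cache
  if d.items.isEmpty || ((d.get? "issues").getD []).isEmpty then []
  else
    let issues := PySem.Dict.ofList ((d.get? "issues").getD [])
    let kws := keywords.map PySem.Str.lower
    -- scored = [(hits(s), k, s) for k, s in issues.items()]; scored = [t for t in scored if t[0] > 0]
    let scored := (issues.items.map (fun p => (pvHits kws p.2, p.1, p.2))).filter (fun t => t.1 > 0)
    -- best = max((t[0] for t in scored), default=0)
    let best := PySem.List.maxD (scored.map (fun t => t.1)) (fun x => x) 0
    -- for h in reversed(range(1, best + 1)): out.extend(sorted(bucket h, key=lambda t: t[1]))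
    let out := ((PySem.List.pyRange 1 (best + 1)).reverse).foldl
      (fun acc h => acc ++ PySem.List.sorted (scored.filter (fun t => t.1 == h)) (fun t => t.2.1)) []
    PySem.List.slice out none (some max_results)

-- ===== PRECONDITION & SPEC =====
def Spec_search_cache_py (cache : List (String × List (String × String))) (keywords : List String) (max_results : Int) (out : List (Int × String × String)) : Prop := out = search_cache_py_alt cache keywords max_results
instance (cache : List (String × List (String × String))) (keywords : List String) (max_results : Int) (out : List (Int × String × String)) : Decidable (Spec_search_cache_py cache keywords max_results out) := by unfold Spec_search_cache_py; infer_instance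

-- ===== CLAIM (what is proved, stated in full; the proofs are below) =====
def Claim_equal_search_cache_py : Prop := ∀ (cache : List (String × List (String × String))) (keywords : List String) (max_results : Int), Dom_search_cache_py cache keywords max_results → Spec_search_cache_py cache keywords max_results (search_cache_py cache keywords max_results)

-- ===== LEMMAS AND PROOFS =====

-- A's fold step, reshaped for PySem.List.foldl_append_if
lemma pvStepA_shape (kws : List String) :
    (fun (acc : List (Int × String × String)) (p : String × String) =>
        let hits := pvHits kws p.2
        if hits > 0 then acc ++ [(hits, p.1, p.2)] else acc)
    = (fun acc p => if (fun x : String × String => decide (0 < pvHits kws x.2)) p = true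
        then acc ++ [((fun x : String × String => (pvHits kws x.2, x.1, x.2)) p)] else acc) := by
  funext acc p
  by_cases h : 0 < pvHits kws p.2 <;> simp [h]

-- pyRange with step 1 is strictly increasing
lemma pvRange_pairwise (a b : Int) : (PySem.List.pyRange a b).Pairwise (· < ·) := by
  rw [PySem.List.pyRange_of_pos a b (by norm_num : (0:Int) < 1)]
  refine List.pairwise_map.mpr ?_
  exact (List.pairwise_lt_range).imp (by intro i j h; omega)

-- sorted2 with keys (k1, k2) is sorted with the lexicographic product key
lemma pvSorted2_eq_sorted_lex {α : Type} (xs : List α) (k1 : α → Int) (k2 : α → String) :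
    PySem.List.sorted2 xs k1 k2
      = PySem.List.sorted xs (fun x => toLex (k1 x, k2 x)) := by
  rw [PySem.List.sorted_eq_foldl_insertBy]
  show List.foldl (fun acc x => PySem.List.insertBy _ x acc) [] xs = _
  congr 1
  funext acc x
  congr 1
  funext p q
  by_cases h1 : k1 p < k1 q
  · simp [h1, Prod.Lex.toLex_lt_toLex]
  · by_cases h2 : k1 q < k1 p
    · have : ¬ toLex (k1 p, k2 p) < toLex (k1 q, k2 q) := by
        simp [Prod.Lex.toLex_lt_toLex]; constructor <;> omega
      simp [h1, h2, this]
    · have he : k1 p = k1 q := le_antisymm (not_lt.mp h2) (not_lt.mp h1)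
      by_cases h3 : k2 p < k2 q <;>
        simp [h3, Prod.Lex.toLex_lt_toLex, he]

-- a strictly-≤ pairwise list with distinct keys is strictly-< pairwise
lemma pvPairwise_strict {α : Type} (l : List α) (k : α → String)
    (hle : l.Pairwise (fun a b => k a ≤ k b)) (hnd : (l.map k).Nodup) :
    l.Pairwise (fun a b => k a < k b) := by
  have hne : l.Pairwise (fun a b => k a ≠ k b) := List.pairwise_map.mp hnd
  exact (hle.and hne).imp (fun h => lt_of_le_of_ne h.1 h.2)

-- the heart: concatenated per-hit-count buckets (hit counts strictly decreasing, each bucket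
-- sorted by key) are a permutation of scored and strictly increasing under the key (-hits, key)
lemma pvBlocks (hs : List Int) (scored : List (Int × String × String))
    (hdec : hs.Pairwise (· > ·))
    (hmem : ∀ t ∈ scored, t.1 ∈ hs)
    (hnd : (scored.map (fun t => t.2.1)).Nodup) :
    (hs.flatMap (fun h => PySem.List.sorted (scored.filter (fun t => t.1 == h)) (fun t => t.2.1))).Perm scored ∧
    (hs.flatMap (fun h => PySem.List.sorted (scored.filter (fun t => t.1 == h)) (fun t => t.2.1))).Pairwise
      (fun a b => (toLex (-a.1, a.2.1) : Lex (Int × String)) < toLex (-b.1, b.2.1)) := by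
  induction hs generalizing scored with
  | nil =>
    have : scored = [] := by
      cases scored with
      | nil => rfl
      | cons t ts => exact absurd (hmem t (List.mem_cons_self)) (List.not_mem_nil)
    subst this; simp
  | cons h hs ih =>
    have hgt : ∀ h' ∈ hs, h' < h := fun h' hh' => (List.pairwise_cons.mp hdec).1 h' hh'
    set rest := scored.filter (fun t => !(t.1 == h)) with hrest
    have hfilter_eq : ∀ h' ∈ hs, scored.filter (fun t => t.1 == h') = rest.filter (fun t => t.1 == h') := by
      intro h' hh'
      rw [hrest, List.filter_filter]
      apply List.filter_congr
      intro t _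
      by_cases ht : t.1 = h'
      · have hne : h' ≠ h := by have := hgt h' hh'; omega
        simp [ht, hne]
      · simp [ht]
    have hflat_eq :
        hs.flatMap (fun h' => PySem.List.sorted (scored.filter (fun t => t.1 == h')) (fun t => t.2.1)) =
        hs.flatMap (fun h' => PySem.List.sorted (rest.filter (fun t => t.1 == h')) (fun t => t.2.1)) := by
      apply List.flatMap_congr
      intro h' hh'
      rw [hfilter_eq h' hh']
    have hrest_mem : ∀ t ∈ rest, t.1 ∈ hs := by
      intro t ht
      obtain ⟨hts, htb⟩ := List.mem_filter.mp ht
      have := hmem t hts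
      rcases List.mem_cons.mp this with h1 | h2
      · exfalso; simp [h1] at htb
      · exact h2
    have hrest_nd : (rest.map (fun t => t.2.1)).Nodup :=
      List.Nodup.sublist (List.Sublist.map _ List.filter_sublist) hnd
    obtain ⟨ihp, ihpw⟩ := ih rest (List.pairwise_cons.mp hdec).2 hrest_mem hrest_nd
    rw [List.flatMap_cons, hflat_eq]
    have hbucket_perm : (PySem.List.sorted (scored.filter (fun t => t.1 == h)) (fun t => t.2.1)).Perm
        (scored.filter (fun t => t.1 == h)) := PySem.List.sorted_perm _ _ _
    constructor
    · -- permutation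
      refine List.Perm.trans (List.Perm.append hbucket_perm ihp) ?_
      simpa [hrest] using List.filter_append_perm (fun t => t.1 == h) scored
    · -- pairwise
      rw [List.pairwise_append]
      refine ⟨?_, ihpw, ?_⟩
      · -- within the bucket: same hit count h, keys strictly increasing
        have hmemb : ∀ t ∈ PySem.List.sorted (scored.filter (fun t => t.1 == h)) (fun t => t.2.1),
            t.1 = h := by
          intro t ht
          have := (PySem.List.mem_sorted _ _ _ _).mp ht
          exact by simpa using (List.mem_filter.mp this).2
        have hle := PySem.List.sorted_pairwise (scored.filter (fun t => t.1 == h)) (fun t => t.2.1)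
        have hndb : ((PySem.List.sorted (scored.filter (fun t => t.1 == h)) (fun t => t.2.1)).map
            (fun t => t.2.1)).Nodup := by
          refine ((hbucket_perm.map _).nodup_iff).mpr ?_
          exact List.Nodup.sublist (List.Sublist.map _ List.filter_sublist) hnd
        have hstrict := pvPairwise_strict _ _ hle hndb
        refine (hstrict.and ((List.pairwise_of_forall_mem_list
            (fun (a : Int × String × String) ha (b : Int × String × String) hb =>
              (hmemb a ha).trans (hmemb b hb).symm)).imp (fun h => h))).imp ?_
        intro a b ⟨hk, hh⟩
        rw [Prod.Lex.toLex_lt_toLex]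
        right
        exact ⟨by simp [hh], hk⟩
      · -- across buckets: strictly smaller hit count later
        intro a ha b hb
        have ha1 : a.1 = h := by
          have := (PySem.List.mem_sorted _ _ _ _).mp ha
          simpa using (List.mem_filter.mp this).2
        have hb1 : b.1 < h := by
          obtain ⟨h', hh', hbm⟩ := List.mem_flatMap.mp hb
          have := (PySem.List.mem_sorted _ _ _ _).mp hbm
          have : b.1 = h' := by simpa using (List.mem_filter.mp this).2
          rw [this]; exact hgt h' hh'
        rw [Prod.Lex.toLex_lt_toLex]
        left
        omega

-- ===== VERDICT (by name: the statement is the Claim_ definition above) =====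
set_option maxHeartbeats 1000000 in
theorem search_cache_py_spec : Claim_equal_search_cache_py := by
  intro cache keywords max_results _
  unfold Spec_search_cache_py search_cache_py search_cache_py_alt
  simp only []
  by_cases hg : (PySem.Dict.ofList cache).items.isEmpty
      || (((PySem.Dict.ofList cache).get? "issues").getD []).isEmpty
  · simp [hg]
  · simp only [hg, if_neg, Bool.false_eq_true, not_false_eq_true]
    set items := (PySem.Dict.ofList (((PySem.Dict.ofList cache).get? "issues").getD [])).items with hitems
    set kws := keywords.map PySem.Str.lower with hkws
    -- A's scored list in filter/map form
    have hscored :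
        items.foldl (fun acc p =>
            let hits := pvHits kws p.2
            if hits > 0 then acc ++ [(hits, p.1, p.2)] else acc) [] =
        (items.filter (fun x => decide (0 < pvHits kws x.2))).map
            (fun x => (pvHits kws x.2, x.1, x.2)) := by
      rw [pvStepA_shape, PySem.List.foldl_append_if]
      simp
    set scored := (items.filter (fun x => decide (0 < pvHits kws x.2))).map
        (fun x => (pvHits kws x.2, x.1, x.2)) with hscored_def
    -- B's map-then-filter list is the same as A's filter-then-map list
    have hscB : (items.map (fun p => (pvHits kws p.2, p.1, p.2))).filter (fun t => t.1 > 0) = scored := by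
      rw [List.filter_map]; rfl
    rw [hscored, hscB]
    set best := PySem.List.maxD (scored.map (fun t => t.1)) (fun x => x) 0 with hbest
    -- facts about scored
    have hpos : ∀ t ∈ scored, 0 < t.1 := by
      intro t ht
      obtain ⟨x, hx, rfl⟩ := List.mem_map.mp ht
      exact of_decide_eq_true (List.mem_filter.mp hx).2
    have hle_best : ∀ t ∈ scored, t.1 ≤ best := by
      intro t ht
      have hmem1 : t.1 ∈ scored.map (fun t => t.1) := List.mem_map_of_mem ht
      cases hm : PySem.List.max? (scored.map (fun t => t.1)) (fun x => x) with
      | none =>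
        rw [PySem.List.max?_eq_none_iff] at hm
        rw [hm] at hmem1
        cases hmem1
      | some m =>
        have := PySem.List.max?_isMax hm t.1 hmem1
        simpa [hbest, PySem.List.maxD, hm] using this
    have hnd : (scored.map (fun t => t.2.1)).Nodup := by
      rw [hscored_def, List.map_map]
      have : ((fun t : Int × String × String => t.2.1) ∘ fun x : String × String =>
          (pvHits kws x.2, x.1, x.2)) = fun x : String × String => x.1 := rfl
      rw [this]
      refine List.Nodup.sublist (List.Sublist.map _ List.filter_sublist) ?_
      have := PySem.Dict.nodup_keys_ofList (κ := String) (ν := String)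
        (((PySem.Dict.ofList cache).get? "issues").getD [])
      simpa [PySem.Dict.keys, hitems] using this
    -- the bucket walk
    set hs := (PySem.List.pyRange 1 (best + 1)).reverse with hhs
    have hdec : hs.Pairwise (· > ·) := by
      rw [hhs, List.pairwise_reverse]
      exact pvRange_pairwise 1 (best + 1)
    have hmem : ∀ t ∈ scored, t.1 ∈ hs := by
      intro t ht
      rw [hhs, List.mem_reverse, PySem.List.mem_pyRange_one]
      exact ⟨hpos t ht, by have := hle_best t ht; omega⟩
    obtain ⟨hperm, hpw⟩ := pvBlocks hs scored hdec hmem hnd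
    have hout : hs.foldl (fun acc h =>
        acc ++ PySem.List.sorted (scored.filter (fun t => t.1 == h)) (fun t => t.2.1)) [] =
        hs.flatMap (fun h => PySem.List.sorted (scored.filter (fun t => t.1 == h)) (fun t => t.2.1)) := by
      rw [PySem.List.foldl_append_eq_flatMap]; simp
    rw [hout]
    congr 1
    rw [pvSorted2_eq_sorted_lex]
    exact PySem.List.sorted_eq_of_perm_of_pairwise_lt scored _ _ hperm hpw
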